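-- pv_equiv track=rewrite | github.com/MendelDebrabandere/ScriptingtalenUgent | Reeks_02/piRamidale.py | prepinput
-- ===== SOURCE A (Python) =====
-- def prepinput(alph):
--     returnstr = ''
--     leadingzero = True
--     for c in alph:
--         if c.isnumeric():
--             if leadingzero and c == '0':
--                 pass
--             else:
--                 leadingzero = False
--                 returnstr += c
--     return returnstr
-- ===== SOURCE B (Python) =====
-- def prepinput(alph):
--     # Find the first significant digit (a numeric char other than '0');
--     # everything before it contributes nothing, so just filter the suffix.
--     for i, c in enumerate(alph):
--         if c.isnumeric() and c != '0':
--             return ''.join(ch for ch in alph[i:] if ch.isnumeric())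
--     return ''
-- ===== Notes on version B (the rewrite author's own statement) =====
-- stated objective: alternative
-- what changed: Instead of one pass maintaining a leadingzero flag, B scans for the index of the first significant digit (numeric and other than the zero character), returns early with an empty result if none exists, and otherwise filters numeric characters from that suffix only - a find-then-filter-suffix decomposition with no flag and no stripping.
import Mathlib
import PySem

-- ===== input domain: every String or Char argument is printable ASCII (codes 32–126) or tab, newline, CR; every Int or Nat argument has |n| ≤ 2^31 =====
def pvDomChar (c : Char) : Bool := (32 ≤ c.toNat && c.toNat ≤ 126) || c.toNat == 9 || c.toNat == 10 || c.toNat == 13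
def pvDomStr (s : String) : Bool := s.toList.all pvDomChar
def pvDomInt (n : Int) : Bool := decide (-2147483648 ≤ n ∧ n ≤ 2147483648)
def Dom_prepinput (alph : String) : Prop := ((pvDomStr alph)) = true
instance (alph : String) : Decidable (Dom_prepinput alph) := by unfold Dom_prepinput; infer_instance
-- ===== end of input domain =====

-- B replaces A's single pass with a leadingzero flag by: find the first significant digit
-- (numeric and not '0'), then filter digits from that suffix only; '' if none exists.
-- On the printable-ASCII domain Python's c.isnumeric() coincides with isdigit; both ports use PySem.Chars.isdigit (exact on Dom).

-- ===== PORT A =====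
-- loop over the characters carrying (returnstr, leadingzero)
def prepinputLoop : List Char → List Char → Bool → List Char
  | [], acc, _ => acc
  | c :: cs, acc, lz =>
    if PySem.Chars.isdigit c then
      if lz && (c == '0') then prepinputLoop cs acc lz
      else prepinputLoop cs (acc ++ [c]) false
    else prepinputLoop cs acc lz

def prepinput (alph : String) : String :=
  String.mk (prepinputLoop alph.toList [] true)

-- ===== PORT B =====
-- the early-returning enumerate loop: first suffix starting at a significant digit, none if there is none
def findSig : List Char → Option (List Char)
  | [] => none
  | c :: cs => if PySem.Chars.isdigit c && !(c == '0') then some (c :: cs) else findSig cs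

def prepinput_alt (alph : String) : String :=
  match findSig alph.toList with
  | some suf => String.mk (suf.filter PySem.Chars.isdigit)
  | none => ""

-- ===== PRECONDITION & SPEC =====
def Spec_prepinput (alph : String) (out : String) : Prop := out = prepinput_alt alph
instance (alph : String) (out : String) : Decidable (Spec_prepinput alph out) := by unfold Spec_prepinput; infer_instance

-- ===== CLAIM (what is proved, stated in full; the proofs are below) =====
def Claim_equal_prepinput : Prop := ∀ (alph : String), Dom_prepinput alph → Spec_prepinput alph (prepinput alph)

-- ===== LEMMAS AND PROOFS =====

-- once the flag is false, the loop just appends every remaining digit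
theorem prepinputLoop_false (cs : List Char) : ∀ acc,
    prepinputLoop cs acc false = acc ++ cs.filter PySem.Chars.isdigit := by
  induction cs with
  | nil => intro acc; simp [prepinputLoop]
  | cons c cs ih =>
    intro acc
    by_cases h : PySem.Chars.isdigit c = true <;>
      simp [prepinputLoop, h, ih, List.filter_cons]

-- with the flag true and empty accumulator, the loop computes B's find-then-filter result
theorem prepinputLoop_true (cs : List Char) :
    prepinputLoop cs [] true =
      (match findSig cs with
       | some suf => suf.filter PySem.Chars.isdigit
       | none => []) := by
  induction cs with
  | nil => simp [prepinputLoop, findSig]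
  | cons c cs ih =>
    by_cases h : PySem.Chars.isdigit c = true
    · by_cases hz : c = '0'
      · subst hz
        simp [prepinputLoop, h, findSig, ih]
      · have hz' : (c == '0') = false := by simp [hz]
        simp [prepinputLoop, h, hz', findSig, prepinputLoop_false, List.filter_cons]
    · simp [prepinputLoop, h, findSig, ih]

-- ===== VERDICT (by name: the statement is the Claim_ definition above) =====
theorem prepinput_spec : Claim_equal_prepinput := by
  intro alph _
  unfold Spec_prepinput prepinput prepinput_alt
  rw [prepinputLoop_true]
  cases findSig alph.toList <;> rfl
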